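-- pv_equiv track=rewrite | github.com/kcerauno/SLOT_AND_HMM | hypothesis/03_trigram/source/trigram_role_analysis.py | find_v8_splits_first
-- ===== SOURCE A (Python) =====
-- SLOTS_V8 = [
--     ["l", "r", "o", "y", "s", "v"],
--     ["q", "s", "d", "x", "l", "r", "h", "z"],
--     ["o", "y"], ["d", "r"], ["t", "k", "p", "f"],
--     ["ch", "sh"], ["cth", "ckh", "cph", "cfh"],
--     ["eee", "ee", "e", "g"],
--     ["k", "t", "p", "f", "ch", "sh", "l", "r", "o", "y"],
--     ["s", "d", "c"], ["o", "a", "y"], ["iii", "ii", "i"],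
--     ["d", "l", "r", "m", "n"], ["s"], ["y"],
--     ["k", "t", "p", "f", "l", "r", "o", "y"],
-- ]
--
-- def parse_greedy(word: str) -> tuple:
--     pos = 0
--     matched = []
--     for idx, options in enumerate(SLOTS_V8):
--         if pos >= len(word):
--             break
--         for opt in options:
--             if word.startswith(opt, pos):
--                 matched.append((idx, opt))
--                 pos += len(opt)
--                 break
--     return matched, word[pos:]
--
-- def is_base(word: str) -> bool:
--     m, r = parse_greedy(word)
--     return r == "" and bool(m)
--
-- def find_v8_splits_first(word: str):
--     """最初の有効な V8 複合語分割を返す（2基以上のみ）"""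
--     for i in range(1, len(word)):
--         p1 = word[:i]
--         if not is_base(p1):
--             continue
--         rest = word[i:]
--         if is_base(rest):
--             return (p1, rest)
--         for j in range(1, len(rest)):
--             p2 = rest[:j]
--             if not is_base(p2):
--                 continue
--             rest2 = rest[j:]
--             if is_base(rest2):
--                 return (p1, p2, rest2)
--             for kk in range(1, len(rest2)):
--                 if is_base(rest2[:kk]) and is_base(rest2[kk:]):
--                     return (p1, p2, rest2[:kk], rest2[kk:])
--     return None
-- ===== SOURCE B (Python) =====
-- SLOTS_V8 = [
--     ["l", "r", "o", "y", "s", "v"],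
--     ["q", "s", "d", "x", "l", "r", "h", "z"],
--     ["o", "y"], ["d", "r"], ["t", "k", "p", "f"],
--     ["ch", "sh"], ["cth", "ckh", "cph", "cfh"],
--     ["eee", "ee", "e", "g"],
--     ["k", "t", "p", "f", "ch", "sh", "l", "r", "o", "y"],
--     ["s", "d", "c"], ["o", "a", "y"], ["iii", "ii", "i"],
--     ["d", "l", "r", "m", "n"], ["s"], ["y"],
--     ["k", "t", "p", "f", "l", "r", "o", "y"],
-- ]
--
-- def _is_base(w):
--     # greedy slot parse tracking only (position, matched-anything) instead of a match list
--     pos = 0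
--     any_match = False
--     for options in SLOTS_V8:
--         if pos >= len(w):
--             break
--         for opt in options:
--             if w.startswith(opt, pos):
--                 pos += len(opt)
--                 any_match = True
--                 break
--     return any_match and pos >= len(w)
--
-- def find_v8_splits_first(word):
--     n = len(word)
--
--     def rec(i, parts_left):
--         # first split of word[i:] into 2..parts_left bases (shortest first part first,
--         # fewer parts preferred at each level)
--         for k in range(i + 1, n):
--             if not _is_base(word[i:k]):
--                 continue
--             if _is_base(word[k:]):
--                 return [word[i:k], word[k:]]
--             if parts_left > 2:
--                 sub = rec(k, parts_left - 1)
--                 if sub is not None: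
--                     return [word[i:k]] + sub
--         return None
--
--     res = rec(0, 4)
--     return None if res is None else tuple(res)
-- ===== Notes on version B (the rewrite author's own statement) =====
-- stated objective: simpler
-- what changed: A's three copy-pasted nested loops (2-, 3- and 4-part attempts) become one recursive search rec(i, parts_left) over absolute indices, and is_base tracks only (position, any-match flag) instead of building a list of matched slots and slicing the remainder.
import Mathlib
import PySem

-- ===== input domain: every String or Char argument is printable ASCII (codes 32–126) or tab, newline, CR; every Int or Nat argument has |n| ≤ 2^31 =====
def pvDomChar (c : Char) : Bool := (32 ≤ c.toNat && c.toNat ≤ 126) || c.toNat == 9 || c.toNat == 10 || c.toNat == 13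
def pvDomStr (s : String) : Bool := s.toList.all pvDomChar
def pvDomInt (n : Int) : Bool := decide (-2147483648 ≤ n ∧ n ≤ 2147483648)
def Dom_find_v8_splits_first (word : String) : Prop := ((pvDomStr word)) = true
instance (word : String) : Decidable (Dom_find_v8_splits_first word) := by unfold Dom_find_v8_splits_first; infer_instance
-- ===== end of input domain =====

-- B replaces A's three copy-pasted nested loops by one recursive search on (start index,
-- parts-left) and tracks only (position, matched-anything) in the base test; objective: simpler.

-- SLOTS_V8 (module constant shared by both programs), options as char lists
def pvSlots : List (List (List Char)) :=
  [ [['l'], ['r'], ['o'], ['y'], ['s'], ['v']],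
    [['q'], ['s'], ['d'], ['x'], ['l'], ['r'], ['h'], ['z']],
    [['o'], ['y']], [['d'], ['r']], [['t'], ['k'], ['p'], ['f']],
    [['c','h'], ['s','h']], [['c','t','h'], ['c','k','h'], ['c','p','h'], ['c','f','h']],
    [['e','e','e'], ['e','e'], ['e'], ['g']],
    [['k'], ['t'], ['p'], ['f'], ['c','h'], ['s','h'], ['l'], ['r'], ['o'], ['y']],
    [['s'], ['d'], ['c']], [['o'], ['a'], ['y']], [['i','i','i'], ['i','i'], ['i']],
    [['d'], ['l'], ['r'], ['m'], ['n']], [['s']], [['y']],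
    [['k'], ['t'], ['p'], ['f'], ['l'], ['r'], ['o'], ['y']] ]

-- ===== PORT A =====
-- 'for opt in options: if word.startswith(opt, pos): … break' = first matching option;
-- w.startswith(opt, pos) with 0 ≤ pos is exactly a prefix test on w.drop pos.
def pvParseAux (w : List Char) : List (List (List Char)) → Nat → Nat → List (Nat × List Char) → (List (Nat × List Char)) × Nat
  | [], _, pos, matched => (matched, pos)
  | options :: rest, idx, pos, matched =>
    if pos ≥ w.length then (matched, pos)
    else
      match options.find? (fun opt => PySem.Chars.startswith (w.drop pos) opt) with
      | some opt => pvParseAux w rest (idx + 1) (pos + opt.length) (matched ++ [(idx, opt)])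
      | none => pvParseAux w rest (idx + 1) pos matched

def pvParseGreedy (w : List Char) : (List (Nat × List Char)) × List Char :=
  let r := pvParseAux w pvSlots 0 0 []
  (r.1, w.drop r.2)   -- word[pos:] with pos ≥ 0

def pvIsBase (w : List Char) : Bool :=
  let r := pvParseGreedy w
  (r.2 == []) && !r.1.isEmpty

-- innermost loop: for kk in range(1, len(rest2))
def pvLoop3 (rest2 : List Char) : List Nat → Option (List (List Char))
  | [] => none
  | kk :: t =>
    if pvIsBase (rest2.take kk) && pvIsBase (rest2.drop kk) then
      some [rest2.take kk, rest2.drop kk]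
    else pvLoop3 rest2 t

-- middle loop: for j in range(1, len(rest))
def pvLoop2 (rest : List Char) : List Nat → Option (List (List Char))
  | [] => none
  | j :: t =>
    let p2 := rest.take j
    if !pvIsBase p2 then pvLoop2 rest t
    else
      let rest2 := rest.drop j
      if pvIsBase rest2 then some [p2, rest2]
      else
        match pvLoop3 rest2 (List.range' 1 (rest2.length - 1)) with
        | some l => some (p2 :: l)
        | none => pvLoop2 rest t

-- outer loop: for i in range(1, len(word))
def pvLoop1 (w : List Char) : List Nat → Option (List (List Char))
  | [] => none
  | i :: t =>
    let p1 := w.take i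
    if !pvIsBase p1 then pvLoop1 w t
    else
      let rest := w.drop i
      if pvIsBase rest then some [p1, rest]
      else
        match pvLoop2 rest (List.range' 1 (rest.length - 1)) with
        | some l => some (p1 :: l)
        | none => pvLoop1 w t

def find_v8_splits_first (word : String) : Option (List String) :=
  let cs := word.toList
  (pvLoop1 cs (List.range' 1 (cs.length - 1))).map (fun l => l.map String.ofList)

-- ===== PORT B =====
-- greedy slot walk keeping only (pos, any_match)
def pvIbAux (w : List Char) : List (List (List Char)) → Nat → Bool → Nat × Bool
  | [], pos, f => (pos, f)
  | options :: rest, pos, f =>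
    if pos ≥ w.length then (pos, f)
    else
      match options.find? (fun opt => PySem.Chars.startswith (w.drop pos) opt) with
      | some opt => pvIbAux w rest (pos + opt.length) true
      | none => pvIbAux w rest pos f

def pvIsBaseAlt (w : List Char) : Bool :=
  let r := pvIbAux w pvSlots 0 false
  r.2 && decide (r.1 ≥ w.length)

-- rec(i, parts_left): for k in range(i+1, n); word[i:k] = (cs.drop i).take (k-i), word[k:] = cs.drop k
def pvRec (cs : List Char) (n : Nat) (pl : Nat) (i : Nat) (ks : List Nat) : Option (List (List Char)) :=
  match ks with
  | [] => none
  | k :: t =>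
    if !pvIsBaseAlt ((cs.drop i).take (k - i)) then pvRec cs n pl i t
    else if pvIsBaseAlt (cs.drop k) then some [(cs.drop i).take (k - i), cs.drop k]
    else if _h : 2 < pl then
      match pvRec cs n (pl - 1) k (List.range' (k + 1) (n - (k + 1))) with
      | some sub => some ((cs.drop i).take (k - i) :: sub)
      | none => pvRec cs n pl i t
    else pvRec cs n pl i t
termination_by (pl, ks)
decreasing_by
  · right; simp
  · left; omega
  · right; simp
  · right; simp

def find_v8_splits_first_alt (word : String) : Option (List String) :=
  let cs := word.toList
  let n := cs.length
  (pvRec cs n 4 0 (List.range' 1 (n - 1))).map (fun l => l.map String.ofList)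

-- ===== PRECONDITION & SPEC =====
def Spec_find_v8_splits_first (word : String) (out : Option (List String)) : Prop := out = find_v8_splits_first_alt word
instance (word : String) (out : Option (List String)) : Decidable (Spec_find_v8_splits_first word out) := by unfold Spec_find_v8_splits_first; infer_instance

-- ===== CLAIM (what is proved, stated in full; the proofs are below) =====
def Claim_equal_find_v8_splits_first : Prop := ∀ (word : String), Dom_find_v8_splits_first word → Spec_find_v8_splits_first word (find_v8_splits_first word)

-- ===== LEMMAS AND PROOFS =====

-- B's flag-threading walk equals A's list-building walk: same final position, flag = "matched list nonempty"
theorem pvIbAux_eq_parse (w : List Char) (slots : List (List (List Char))) (idx pos : Nat)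
    (matched : List (Nat × List Char)) (f : Bool) (hf : f = !matched.isEmpty) :
    pvIbAux w slots pos f = ((pvParseAux w slots idx pos matched).2, !(pvParseAux w slots idx pos matched).1.isEmpty) := by
  induction slots generalizing idx pos matched f with
  | nil => simp [pvIbAux, pvParseAux, hf]
  | cons options rest ih =>
    simp only [pvIbAux, pvParseAux]
    split
    · simp [hf]
    · cases hfind : options.find? (fun opt => PySem.Chars.startswith (w.drop pos) opt) with
      | none => exact ih (idx + 1) pos matched f hf
      | some opt =>
        apply ih (idx + 1)
        simp

theorem pvIsBaseAlt_eq (w : List Char) : pvIsBaseAlt w = pvIsBase w := by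
  unfold pvIsBaseAlt pvIsBase pvParseGreedy
  rw [pvIbAux_eq_parse w pvSlots 0 0 [] false (by simp)]
  cases h : pvParseAux w pvSlots 0 0 [] with
  | mk m p =>
    simp only
    rw [Bool.and_comm]
    congr 1
    by_cases hle : w.length ≤ p
    · simp [List.drop_eq_nil_iff, hle]
    · simp [List.drop_eq_nil_iff, hle]

theorem pvRange'_map_sub (a s n : Nat) : (List.range' (a + s) n).map (· - a) = List.range' s n := by
  induction n generalizing s with
  | zero => simp
  | succ m ih =>
    rw [List.range'_succ, List.range'_succ, List.map_cons, List.cons_eq_cons]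
    exact ⟨by omega, by simpa [← Nat.add_assoc] using ih (s + 1)⟩

theorem pvRec2_eq (cs : List Char) (i : Nat) (L : List Nat)
    (hL : ∀ k ∈ L, i < k ∧ k < cs.length) :
    pvRec cs cs.length 2 i L = pvLoop3 (cs.drop i) (L.map (· - i)) := by
  induction L with
  | nil => simp [pvRec, pvLoop3]
  | cons k t ih =>
    obtain ⟨hik, hkn⟩ := hL k (List.mem_cons_self ..)
    have hts := ih fun k' hk' => hL k' (List.mem_cons_of_mem _ hk')
    have hdd : (cs.drop i).drop (k - i) = cs.drop k := by
      rw [List.drop_drop]; congr 1; omega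
    rw [pvRec, List.map_cons, pvLoop3, hdd, pvIsBaseAlt_eq, pvIsBaseAlt_eq]
    cases hb1 : pvIsBase ((cs.drop i).take (k - i)) with
    | false => simp [hts]
    | true =>
      cases hb2 : pvIsBase (cs.drop k) with
      | false => simp [hts]
      | true => simp

theorem pvRec3_eq (cs : List Char) (i : Nat) (L : List Nat)
    (hL : ∀ k ∈ L, i < k ∧ k < cs.length) :
    pvRec cs cs.length 3 i L = pvLoop2 (cs.drop i) (L.map (· - i)) := by
  induction L with
  | nil => simp [pvRec, pvLoop2]
  | cons k t ih =>
    obtain ⟨hik, hkn⟩ := hL k (List.mem_cons_self ..)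
    have hts := ih fun k' hk' => hL k' (List.mem_cons_of_mem _ hk')
    have hdd : (cs.drop i).drop (k - i) = cs.drop k := by
      rw [List.drop_drop]; congr 1; omega
    have hinner : pvRec cs cs.length 2 k (List.range' (k + 1) (cs.length - (k + 1)))
        = pvLoop3 (cs.drop k) (List.range' 1 ((cs.drop k).length - 1)) := by
      have hl : (List.drop k cs).length - 1 = cs.length - (k + 1) := by simp; omega
      rw [pvRec2_eq cs k _ (fun k' hk' => by rw [List.mem_range'_1] at hk'; omega),
          hl, ← pvRange'_map_sub k 1 (cs.length - (k + 1))]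
    rw [pvRec, List.map_cons, pvLoop2]
    simp only [pvIsBaseAlt_eq, hdd]
    cases hb1 : pvIsBase ((cs.drop i).take (k - i)) with
    | false => simp [hts]
    | true =>
      cases hb2 : pvIsBase (cs.drop k) with
      | true => simp
      | false =>
        simp only [Bool.not_true, Bool.false_eq_true, reduceIte]
        rw [dif_pos (by omega : (2:Nat) < 3)]
        simp only [show (3:Nat) - 1 = 2 from rfl]
        rw [hinner]
        cases h3 : pvLoop3 (cs.drop k) (List.range' 1 ((cs.drop k).length - 1)) with
        | some l => simp
        | none => simp [hts]

theorem pvRec4_eq (cs : List Char) (i : Nat) (L : List Nat)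
    (hL : ∀ k ∈ L, i < k ∧ k < cs.length) :
    pvRec cs cs.length 4 i L = pvLoop1 (cs.drop i) (L.map (· - i)) := by
  induction L with
  | nil => simp [pvRec, pvLoop1]
  | cons k t ih =>
    obtain ⟨hik, hkn⟩ := hL k (List.mem_cons_self ..)
    have hts := ih fun k' hk' => hL k' (List.mem_cons_of_mem _ hk')
    have hdd : (cs.drop i).drop (k - i) = cs.drop k := by
      rw [List.drop_drop]; congr 1; omega
    have hinner : pvRec cs cs.length 3 k (List.range' (k + 1) (cs.length - (k + 1)))
        = pvLoop2 (cs.drop k) (List.range' 1 ((cs.drop k).length - 1)) := by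
      have hl : (List.drop k cs).length - 1 = cs.length - (k + 1) := by simp; omega
      rw [pvRec3_eq cs k _ (fun k' hk' => by rw [List.mem_range'_1] at hk'; omega),
          hl, ← pvRange'_map_sub k 1 (cs.length - (k + 1))]
    rw [pvRec, List.map_cons, pvLoop1]
    simp only [pvIsBaseAlt_eq, hdd]
    cases hb1 : pvIsBase ((cs.drop i).take (k - i)) with
    | false => simp [hts]
    | true =>
      cases hb2 : pvIsBase (cs.drop k) with
      | true => simp
      | false =>
        simp only [Bool.not_true, Bool.false_eq_true, reduceIte]
        rw [dif_pos (by omega : (2:Nat) < 4)]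
        simp only [show (4:Nat) - 1 = 3 from rfl]
        rw [hinner]
        cases h3 : pvLoop2 (cs.drop k) (List.range' 1 ((cs.drop k).length - 1)) with
        | some l => simp
        | none => simp [hts]

-- ===== VERDICT (by name: the statement is the Claim_ definition above) =====
theorem find_v8_splits_first_spec : Claim_equal_find_v8_splits_first := by
  intro word _
  unfold Spec_find_v8_splits_first find_v8_splits_first find_v8_splits_first_alt
  simp only
  congr 1
  rw [pvRec4_eq word.toList 0 _ (fun k hk => by rw [List.mem_range'_1] at hk; omega)]
  simp
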